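-- pv_equiv track=rewrite | github.com/kharvd/advent_of_code | 2023/01/part2.py | find_all_spelled_out_digits
-- ===== SOURCE A (Python) =====
-- def find_all_spelled_out_digits(s):
--     spelled_out_digits = [
--         "one",
--         "two",
--         "three",
--         "four",
--         "five",
--         "six",
--         "seven",
--         "eight",
--         "nine",
--     ]
--
--     all_digits = []
--     for digit in spelled_out_digits:
--         if digit in s:
--             start_index = 0
--             digit_int = spelled_out_digits.index(digit) + 1
--             while True:
--                 index = s.find(digit, start_index)
--                 if index == -1:
--                     break
--                 all_digits.append((index, digit_int))
--                 start_index = index + 1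
--     return sorted(all_digits)
-- ===== SOURCE B (Python) =====
-- def find_all_spelled_out_digits(s):
--     words = ["one", "two", "three", "four", "five", "six", "seven", "eight", "nine"]
--     result = []
--     for i in range(len(s)):
--         for value, word in enumerate(words, 1):
--             if s.startswith(word, i):
--                 result.append((i, value))
--     return result
-- ===== Notes on version B (the rewrite author's own statement) =====
-- stated objective: alternative
-- what changed: B scans string positions once and tests the nine digit words at each position (positions outer, words inner), producing the pairs already in index order, instead of A's per-word repeated find() followed by a sort.
import Mathlib
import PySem

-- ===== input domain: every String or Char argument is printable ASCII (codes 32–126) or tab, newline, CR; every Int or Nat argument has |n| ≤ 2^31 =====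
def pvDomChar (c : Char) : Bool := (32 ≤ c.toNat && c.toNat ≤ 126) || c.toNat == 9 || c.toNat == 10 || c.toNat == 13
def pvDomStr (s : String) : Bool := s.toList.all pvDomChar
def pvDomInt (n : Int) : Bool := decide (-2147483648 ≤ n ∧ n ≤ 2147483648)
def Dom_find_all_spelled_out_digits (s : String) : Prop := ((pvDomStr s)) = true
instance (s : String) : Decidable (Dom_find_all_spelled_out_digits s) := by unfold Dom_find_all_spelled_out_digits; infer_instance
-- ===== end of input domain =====

-- B scans string positions once, testing the nine digit words at each position, so the pairs come out
-- already in index order; A does a repeated find() per word and sorts at the end (objective: alternative).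

-- ===== PORT A =====
-- A's inner 'while True' loop of repeated s.find(digit, start_index); fuel only makes the recursion
-- structural (s.length + 1 iterations always suffice, see pvAFindLoop_spec below).
def pvAFindLoop (s digit : List Char) (digit_int : Int) (start_index : Int)
    (all_digits : List (Int × Int)) : Nat → List (Int × Int)
  | 0 => all_digits
  | fuel + 1 =>
    let index := PySem.Chars.findFrom s digit start_index none
    if index = -1 then all_digits
    else pvAFindLoop s digit digit_int (index + 1) (all_digits ++ [(index, digit_int)]) fuel

def find_all_spelled_out_digits (s : String) : List (Int × Int) :=
  let spelled_out_digits : List String :=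
    ["one", "two", "three", "four", "five", "six", "seven", "eight", "nine"]
  let all_digits := spelled_out_digits.foldl (fun all_digits digit =>
    if PySem.Str.isIn digit s then
      -- digit is always in the list, so list.index never raises here
      let digit_int : Int := ((PySem.List.index? spelled_out_digits digit).getD 0 : Nat) + 1
      pvAFindLoop s.toList digit.toList digit_int 0 all_digits (s.toList.length + 1)
    else all_digits) []
  -- sorted(list of int pairs): Python's lexicographic tuple order
  PySem.List.sorted2 all_digits (fun p => p.1) (fun p => p.2) false

-- ===== PORT B =====
def find_all_spelled_out_digits_alt (s : String) : List (Int × Int) :=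
  let words : List String :=
    ["one", "two", "three", "four", "five", "six", "seven", "eight", "nine"]
  (List.range s.toList.length).foldl (fun result i =>
    (PySem.List.enumerate words 1).foldl (fun result vw =>
      -- s.startswith(word, i): exact since 0 ≤ i < len(s)
      if PySem.Chars.startswith (s.toList.drop i) vw.2.toList then
        result ++ [((i : Int), vw.1)]
      else result) result) []

-- ===== PRECONDITION & SPEC =====
def Spec_find_all_spelled_out_digits (s : String) (out : List (Int × Int)) : Prop := out = find_all_spelled_out_digits_alt s
instance (s : String) (out : List (Int × Int)) : Decidable (Spec_find_all_spelled_out_digits s out) := by unfold Spec_find_all_spelled_out_digits; infer_instance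

-- ===== CLAIM (what is proved, stated in full; the proofs are below) =====
def Claim_equal_find_all_spelled_out_digits : Prop := ∀ (s : String), Dom_find_all_spelled_out_digits s → Spec_find_all_spelled_out_digits s (find_all_spelled_out_digits s)

-- ===== LEMMAS AND PROOFS =====

-- the nine (value, word) pairs, as char lists
def pvP : List (Int × List Char) :=
  [(1, "one".toList), (2, "two".toList), (3, "three".toList), (4, "four".toList),
   (5, "five".toList), (6, "six".toList), (7, "seven".toList), (8, "eight".toList),
   (9, "nine".toList)]

-- occurrence positions of w in cs that are ≥ k
def pvOccFrom (cs w : List Char) (k : Nat) : List Nat :=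
  (List.range' k (cs.length - k)).filter (fun i => PySem.Chars.startswith (cs.drop i) w)

lemma pvSW (t w : List Char) : PySem.Chars.startswith t w = decide (w <+: t) := by
  by_cases h : w <+: t
  · rw [(PySem.Chars.startswith_iff t w).mpr h, decide_eq_true h]
  · rw [Bool.eq_false_iff.mpr (fun hh => h ((PySem.Chars.startswith_iff t w).mp hh)),
      decide_eq_false h]

lemma pvOccFrom_nil (cs w : List Char) (k : Nat) (h : ¬ w <:+: cs.drop k) :
    pvOccFrom cs w k = [] := by
  refine List.filter_eq_nil_iff.mpr ?_
  intro i hi hsw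
  rw [pvSW] at hsw
  have hpre : w <+: cs.drop i := of_decide_eq_true hsw
  have hk : k ≤ i := (List.mem_range'_1.mp hi).1
  apply h
  have : cs.drop i = (cs.drop k).drop (i - k) := by
    rw [List.drop_drop]; congr 1; omega
  rw [this] at hpre
  exact hpre.isInfix.trans (List.drop_suffix _ _).isInfix

lemma pvAFindLoop_spec (cs w : List Char) (hw : w ≠ []) (v : Int) :
    ∀ (fuel : Nat) (k : Nat) (acc : List (Int × Int)), k ≤ cs.length →
    cs.length + 1 - k ≤ fuel →
    pvAFindLoop cs w v (k : Int) acc fuel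
      = acc ++ (pvOccFrom cs w k).map (fun i : Nat => ((i : Int), v)) := by
  intro fuel
  induction fuel with
  | zero => intro k acc hk hf; omega
  | succ fuel ih =>
    intro k acc hk hf
    by_cases hr : PySem.Chars.findFrom cs w (k : Int) none = -1
    · have hni : ¬ w <:+: cs.drop k :=
        (PySem.Chars.findFrom_natCast_eq_neg_one_iff cs w k hk).mp hr
      simp [pvAFindLoop, hr, pvOccFrom_nil cs w k hni]
    · obtain ⟨hkr, hpre, hmin⟩ := PySem.Chars.findFrom_natCast_spec cs w k hk hr
      set r : Int := PySem.Chars.findFrom cs w (k : Int) none with hrdef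
      have hr0 : 0 ≤ r := le_trans (by positivity) hkr
      set r₀ : Nat := r.toNat with hr₀def
      have hrcast : (r₀ : Int) = r := Int.toNat_of_nonneg hr0
      have hkr₀ : k ≤ r₀ := by omega
      have hr₀lt : r₀ < cs.length := by
        by_contra hge
        have : cs.drop r₀ = [] := List.drop_eq_nil_of_le (by omega)
        rw [this] at hpre
        exact hw (List.prefix_nil.mp hpre)
      have hrec := ih (r₀ + 1) (acc ++ [(r, v)]) (by omega) (by omega)
      have hsplit : pvOccFrom cs w k = r₀ :: pvOccFrom cs w (r₀ + 1) := by
        unfold pvOccFrom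
        have h1 : List.range' k (cs.length - k)
            = List.range' k (r₀ - k) ++ List.range' r₀ (cs.length - r₀) := by
          have := @List.range'_append k (r₀ - k) (cs.length - r₀) 1
          simp only [one_mul] at this
          rw [show k + (r₀ - k) = r₀ by omega] at this
          rw [this]; congr 1; omega
        have h2 : List.range' r₀ (cs.length - r₀) = r₀ :: List.range' (r₀ + 1) (cs.length - (r₀ + 1)) := by
          rw [show cs.length - r₀ = (cs.length - (r₀ + 1)) + 1 by omega, List.range'_succ]
        rw [h1, h2, List.filter_append, List.filter_cons]
        have hfilt1 : (List.range' k (r₀ - k)).filter (fun i => PySem.Chars.startswith (cs.drop i) w) = [] := by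
          refine List.filter_eq_nil_iff.mpr ?_
          intro i hi hsw
          rw [pvSW] at hsw
          have hi' := List.mem_range'_1.mp hi
          exact hmin i hi'.1 (by omega) (of_decide_eq_true hsw)
        have hsat : PySem.Chars.startswith (cs.drop r₀) w = true := by
          rw [pvSW]; exact decide_eq_true hpre
        rw [hfilt1, hsat]
        simp
      calc pvAFindLoop cs w v (k : Int) acc (fuel + 1)
          = pvAFindLoop cs w v (r + 1) (acc ++ [(r, v)]) fuel := by
            simp only [pvAFindLoop, hr]
            rw [if_neg hr]
        _ = acc ++ (pvOccFrom cs w k).map (fun i : Nat => ((i : Int), v)) := by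
            rw [show r + 1 = ((r₀ + 1 : Nat) : Int) by push_cast; omega, hrec, hsplit]
            simp [hrcast]

-- one step of A's outer loop appends exactly the occurrence pairs of this word
lemma pvStep (cs w : List Char) (hw : w ≠ []) (v : Int) (acc : List (Int × Int)) :
    (if PySem.Chars.isIn w cs then pvAFindLoop cs w v 0 acc (cs.length + 1) else acc)
      = acc ++ (pvOccFrom cs w 0).map (fun i : Nat => ((i : Int), v)) := by
  by_cases h : PySem.Chars.isIn w cs
  · rw [if_pos h]
    have := pvAFindLoop_spec cs w hw v (cs.length + 1) 0 acc (by omega) (by omega)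
    simpa using this
  · rw [if_neg h]
    have hni : ¬ w <:+: cs.drop 0 := by
      simpa using (PySem.Chars.isIn_eq_false_iff w cs).mp (by simpa using h)
    rw [pvOccFrom_nil cs w 0 hni]
    simp

-- A in closed form: per-word occurrence lists, concatenated, then sorted
lemma pvA_eq (s : String) :
    find_all_spelled_out_digits s
      = PySem.List.sorted2
          (pvP.flatMap (fun p => (pvOccFrom s.toList p.2 0).map (fun i : Nat => ((i : Int), p.1))))
          (fun p => p.1) (fun p => p.2) false := by
  unfold find_all_spelled_out_digits
  simp only [List.foldl_cons, List.foldl_nil, PySem.Str.isIn_eq]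
  rw [pvStep s.toList "nine".toList (by decide), pvStep s.toList "eight".toList (by decide),
    pvStep s.toList "seven".toList (by decide), pvStep s.toList "six".toList (by decide),
    pvStep s.toList "five".toList (by decide), pvStep s.toList "four".toList (by decide),
    pvStep s.toList "three".toList (by decide), pvStep s.toList "two".toList (by decide),
    pvStep s.toList "one".toList (by decide)]
  simp only [pvP, List.flatMap_cons, List.flatMap_nil, List.append_nil, List.nil_append,
    List.append_assoc,
    show (((PySem.List.index? ["one", "two", "three", "four", "five", "six", "seven", "eight", "nine"] "one").getD 0 : Int) + 1 = 1) from by decide,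
    show (((PySem.List.index? ["one", "two", "three", "four", "five", "six", "seven", "eight", "nine"] "two").getD 0 : Int) + 1 = 2) from by decide,
    show (((PySem.List.index? ["one", "two", "three", "four", "five", "six", "seven", "eight", "nine"] "three").getD 0 : Int) + 1 = 3) from by decide,
    show (((PySem.List.index? ["one", "two", "three", "four", "five", "six", "seven", "eight", "nine"] "four").getD 0 : Int) + 1 = 4) from by decide,
    show (((PySem.List.index? ["one", "two", "three", "four", "five", "six", "seven", "eight", "nine"] "five").getD 0 : Int) + 1 = 5) from by decide,
    show (((PySem.List.index? ["one", "two", "three", "four", "five", "six", "seven", "eight", "nine"] "six").getD 0 : Int) + 1 = 6) from by decide,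
    show (((PySem.List.index? ["one", "two", "three", "four", "five", "six", "seven", "eight", "nine"] "seven").getD 0 : Int) + 1 = 7) from by decide,
    show (((PySem.List.index? ["one", "two", "three", "four", "five", "six", "seven", "eight", "nine"] "eight").getD 0 : Int) + 1 = 8) from by decide,
    show (((PySem.List.index? ["one", "two", "three", "four", "five", "six", "seven", "eight", "nine"] "nine").getD 0 : Int) + 1 = 9) from by decide]

-- (filter then map) as a flatMap of singletons
lemma pvFilterMap {α β : Type} (p : α → Bool) (f : α → β) (l : List α) :
    (l.filter p).map f = l.flatMap (fun x => if p x then [f x] else []) := by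
  induction l with
  | nil => rfl
  | cons x l ih => by_cases h : p x <;> simp [List.filter_cons, h, ih]

-- B in closed form: per-position matching-word pairs, concatenated
lemma pvB_eq (s : String) :
    find_all_spelled_out_digits_alt s
      = (List.range s.toList.length).flatMap (fun i =>
          (pvP.filter (fun p => PySem.Chars.startswith (s.toList.drop i) p.2)).map
            (fun p => ((i : Int), p.1))) := by
  unfold find_all_spelled_out_digits_alt
  simp only [PySem.List.foldl_append_if]
  rw [PySem.List.foldl_append_eq_flatMap]
  simp only [List.nil_append]
  have hm : pvP = (PySem.List.enumerate
      ["one", "two", "three", "four", "five", "six", "seven", "eight", "nine"] 1).map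
      (fun vw => (vw.1, vw.2.toList)) := by decide
  rw [hm]
  simp only [List.filter_map, List.map_map]
  rfl

-- flatMaps in either nesting order enumerate the same multiset of results
lemma pvFlatMapSwap {α β γ : Type} (l1 : List α) (l2 : List β) (f : α → β → List γ) :
    (l1.flatMap (fun a => l2.flatMap (fun b => f a b))).Perm
      (l2.flatMap (fun b => l1.flatMap (fun a => f a b))) := by
  rw [← Multiset.coe_eq_coe]
  have := Multiset.bind_bind (↑l1) (↑l2) (f := fun a b => ((f a b : List γ) : Multiset γ))
  simpa only [Multiset.coe_bind] using this

-- the two double loops enumerate the same pairs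
lemma pvPerm (s : String) :
    ((List.range s.toList.length).flatMap (fun i =>
        (pvP.filter (fun p => PySem.Chars.startswith (s.toList.drop i) p.2)).map
          (fun p => ((i : Int), p.1)))).Perm
      (pvP.flatMap (fun p => (pvOccFrom s.toList p.2 0).map (fun i : Nat => ((i : Int), p.1)))) := by
  have hA : ∀ p : Int × List Char, (pvOccFrom s.toList p.2 0).map (fun i : Nat => ((i : Int), p.1))
      = (List.range s.toList.length).flatMap (fun i =>
          if PySem.Chars.startswith (s.toList.drop i) p.2 then [((i : Int), p.1)] else []) := by
    intro p
    rw [pvOccFrom, pvFilterMap,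
      show List.range' 0 (s.toList.length - 0) = List.range s.toList.length by
        simp [List.range_eq_range']]
  have hB : ∀ i : Nat,
      (pvP.filter (fun p => PySem.Chars.startswith (s.toList.drop i) p.2)).map
        (fun p => ((i : Int), p.1))
      = pvP.flatMap (fun p =>
          if PySem.Chars.startswith (s.toList.drop i) p.2 then [((i : Int), p.1)] else []) := by
    intro i; rw [pvFilterMap]
  simp only [hA, hB]
  exact pvFlatMapSwap (List.range s.toList.length) pvP
    (fun i p => if PySem.Chars.startswith (s.toList.drop i) p.2 then [((i : Int), p.1)] else [])

-- no digit word is a prefix of another, so at most one matches at a given position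
lemma pvAtMostOne (t : List Char) :
    (pvP.filter (fun p => PySem.Chars.startswith t p.2)).length ≤ 1 := by
  have hpf : ∀ p ∈ pvP, ∀ q ∈ pvP, p.2 <+: q.2 → p = q := by decide
  have hnd : (pvP.filter (fun p => PySem.Chars.startswith t p.2)).Nodup :=
    List.Nodup.filter _ (by decide)
  match hml : pvP.filter (fun p => PySem.Chars.startswith t p.2) with
  | [] => simp [hml]
  | [x] => simp [hml]
  | x :: y :: rest =>
    exfalso
    have hx := List.mem_filter.mp (hml ▸ (by simp : x ∈ x :: y :: rest))
    have hy := List.mem_filter.mp (hml ▸ (by simp : y ∈ x :: y :: rest))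
    have hxp : x.2 <+: t := (PySem.Chars.startswith_iff t x.2).mp hx.2
    have hyp : y.2 <+: t := (PySem.Chars.startswith_iff t y.2).mp hy.2
    have hxy : x = y := by
      rcases List.prefix_or_prefix_of_prefix hxp hyp with h | h
      · exact hpf x hx.1 y hy.1 h
      · exact (hpf y hy.1 x hx.1 h).symm
    rw [hml] at hnd
    exact (List.nodup_cons.mp hnd).1 (hxy ▸ (by simp : y ∈ y :: rest))

lemma pvShortPairwise {α : Type} (R : α → α → Prop) (l : List α) (h : l.length ≤ 1) :
    l.Pairwise R := by
  match l with
  | [] => exact List.Pairwise.nil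
  | [x] => exact List.pairwise_singleton R x
  | x :: y :: r => simp at h

-- B's list is strictly increasing in the first component
lemma pvBPairwise (s : String) :
    ((List.range s.toList.length).flatMap (fun i =>
        (pvP.filter (fun p => PySem.Chars.startswith (s.toList.drop i) p.2)).map
          (fun p => ((i : Int), p.1)))).Pairwise (fun a b => a.1 < b.1) := by
  refine List.pairwise_flatMap.mpr ⟨fun i _ => pvShortPairwise _ _ (by
    simpa using pvAtMostOne (s.toList.drop i)), ?_⟩
  exact List.Pairwise.imp (fun {i j} hij x hx y hy => by
    obtain ⟨p, _, rfl⟩ := List.mem_map.mp hx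
    obtain ⟨q, _, rfl⟩ := List.mem_map.mp hy
    show (i : Int) < (j : Int)
    exact_mod_cast hij) List.pairwise_lt_range

lemma pvMemInsertBy {α : Type} (f : α → α → Bool) (x y : α) (l : List α) :
    y ∈ PySem.List.insertBy f x l ↔ y = x ∨ y ∈ l := by
  induction l with
  | nil => simp [PySem.List.insertBy]
  | cons z l ih =>
    by_cases h : f x z <;> simp [PySem.List.insertBy, h, ih] <;> tauto

lemma pvInsertByCongr {α : Type} (f g : α → α → Bool) (x : α) (l : List α)
    (h : ∀ y ∈ l, f x y = g x y) : PySem.List.insertBy f x l = PySem.List.insertBy g x l := by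
  induction l with
  | nil => rfl
  | cons z l ih =>
    have hz := h z (by simp)
    by_cases hf : f x z
    · simp [PySem.List.insertBy, hf, hz ▸ hf]
    · have hg : ¬ g x z = true := by rw [← hz]; exact hf
      simp [PySem.List.insertBy, hf, hg]
      exact ih (fun y hy => h y (by simp [hy]))

lemma pvFoldInsertCongr {α : Type} (f g : α → α → Bool) (S : α → Prop)
    (hfg : ∀ a b, S a → S b → f a b = g a b) :
    ∀ (xs acc : List α), (∀ x ∈ xs, S x) → (∀ x ∈ acc, S x) →
    xs.foldl (fun acc x => PySem.List.insertBy f x acc) acc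
      = xs.foldl (fun acc x => PySem.List.insertBy g x acc) acc := by
  intro xs
  induction xs with
  | nil => intro acc _ _; rfl
  | cons x xs ih =>
    intro acc hxs hacc
    simp only [List.foldl_cons]
    rw [pvInsertByCongr f g x acc (fun y hy => hfg x y (hxs x (by simp)) (hacc y hy))]
    exact ih _ (fun y hy => hxs y (by simp [hy]))
      (fun y hy => ((pvMemInsertBy g x y acc).mp hy).elim
        (fun h => h ▸ hxs x (by simp)) (hacc y))

-- when first components are distinct within xs, Python's tuple sort is a sort by fst
lemma pvSorted2_eq_sorted (xs : List (Int × Int))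
    (h : ∀ a ∈ xs, ∀ b ∈ xs, a.1 = b.1 → a = b) :
    PySem.List.sorted2 xs (fun p => p.1) (fun p => p.2) false
      = PySem.List.sorted xs (fun p => p.1) false := by
  unfold PySem.List.sorted2 PySem.List.sorted
  simp only [if_neg (by simp : ¬ (false = true))]
  exact pvFoldInsertCongr _ _ (· ∈ xs)
    (fun a b ha hb => by
      rcases lt_trichotomy a.1 b.1 with hlt | heq | hgt
      · simp [hlt, not_lt_of_gt hlt]
      · have := h a ha b hb heq
        subst this
        simp
      · simp [hgt, not_lt_of_gt hgt, le_of_lt hgt])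
    xs [] (fun _ hx => hx) (by simp)

-- ===== VERDICT (by name: the statement is the Claim_ definition above) =====
theorem find_all_spelled_out_digits_spec : Claim_equal_find_all_spelled_out_digits := by
  intro s _
  unfold Spec_find_all_spelled_out_digits
  rw [pvA_eq, pvB_eq]
  have hperm := pvPerm s
  have hpw := pvBPairwise s
  have hdist : ∀ a ∈ (pvP.flatMap (fun p => (pvOccFrom s.toList p.2 0).map (fun i : Nat => ((i : Int), p.1)))),
      ∀ b ∈ (pvP.flatMap (fun p => (pvOccFrom s.toList p.2 0).map (fun i : Nat => ((i : Int), p.1)))),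
      a.1 = b.1 → a = b := by
    have hnd : (((List.range s.toList.length).flatMap (fun i =>
        (pvP.filter (fun p => PySem.Chars.startswith (s.toList.drop i) p.2)).map
          (fun p => ((i : Int), p.1)))).map (fun p => p.1)).Nodup :=
      List.Pairwise.imp (fun h => ne_of_lt h)
        (List.Pairwise.map (R := fun (a b : Int × Int) => a.1 < b.1)
          (S := fun (a b : Int) => a < b) (fun p => p.1) (fun _ _ h => h) hpw)
    intro a ha b hb heq
    exact List.inj_on_of_nodup_map hnd (hperm.mem_iff.mpr ha) (hperm.mem_iff.mpr hb) heq
  rw [pvSorted2_eq_sorted _ hdist]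
  exact PySem.List.sorted_eq_of_perm_of_pairwise_lt _ _ _ hperm hpw
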